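-- pv_equiv track=rewrite | github.com/T-R0D/JustForFun | aoc2018/aoc2018/day12/solution.py | layout_to_int_of_bits
-- ===== SOURCE A (Python) =====
-- PLANT = "#"
--
-- def layout_to_int_of_bits(layout):
--     int_of_bits = 0
--     for x in reversed(layout):
--         int_of_bits <<= 1
--         if x == PLANT:
--             int_of_bits |= 1
--
--     negative_bound = 5
--     int_of_bits <<= negative_bound
--
--     return int_of_bits, negative_bound, len(layout) + 2
-- ===== SOURCE B (Python) =====
-- PLANT = "#"
--
-- def layout_to_int_of_bits(layout):
--     # Divide-and-conquer: the bitmask of a layout is value(left half) plus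
--     # value(right half) shifted by the split point; recursion bottoms out at
--     # single characters. No running accumulator, no reversed scan.
--     negative_bound = 5
--
--     def value(s):
--         # integer whose bit i is set iff s[i] == PLANT
--         if len(s) <= 1:
--             return 1 if s == PLANT else 0
--         m = len(s) // 2
--         return value(s[:m]) + (value(s[m:]) << m)
--
--     return value(layout) << negative_bound, negative_bound, len(layout) + 2
-- ===== Notes on version B (the rewrite author's own statement) =====
-- stated objective: alternative
-- what changed: Replaces A's linear reversed shift-and-or accumulator with a divide-and-conquer recursion that splits the layout in half and combines value(left) + (value(right) << mid).
import Mathlib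
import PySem

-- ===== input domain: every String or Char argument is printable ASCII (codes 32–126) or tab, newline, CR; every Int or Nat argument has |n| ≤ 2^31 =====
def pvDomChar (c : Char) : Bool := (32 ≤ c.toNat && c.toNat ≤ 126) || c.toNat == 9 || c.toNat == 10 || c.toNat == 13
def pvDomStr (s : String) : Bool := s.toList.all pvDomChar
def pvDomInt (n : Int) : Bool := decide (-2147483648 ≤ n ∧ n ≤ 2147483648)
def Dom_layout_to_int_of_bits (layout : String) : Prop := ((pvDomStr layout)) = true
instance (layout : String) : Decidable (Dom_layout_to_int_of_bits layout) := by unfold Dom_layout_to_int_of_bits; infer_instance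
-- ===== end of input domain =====

-- B computes the bitmask by divide-and-conquer (split in half, combine low + high<<mid)
-- instead of A's reversed shift-and-or accumulator (objective: alternative algorithm).


-- ===== PORT A =====
-- `int_of_bits <<= 1` = *2; on the now-even value `|= 1` = +1; final `<<= 5` = * 2^5.
def layout_to_int_of_bits (layout : String) : Int × Int × Int :=
  let int_of_bits : Int :=
    layout.toList.reverse.foldl
      (fun acc x =>
        let acc := acc * 2
        if x = '#' then acc + 1 else acc) 0
  let negative_bound : Int := 5
  (int_of_bits * 2 ^ 5, negative_bound, PySem.Str.len layout + 2)

-- ===== PORT B =====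
-- B's inner `value`: `s[:m]`/`s[m:]` = take/drop, `x << m` = x * 2^m (exact on ints).
def pvValue (s : List Char) : Int :=
  if s.length ≤ 1 then (if s = ['#'] then 1 else 0)
  else
    let m := s.length / 2
    pvValue (s.take m) + pvValue (s.drop m) * 2 ^ m
termination_by s.length
decreasing_by all_goals simp [List.length_take, List.length_drop]; omega

def layout_to_int_of_bits_alt (layout : String) : Int × Int × Int :=
  let negative_bound : Int := 5
  (pvValue layout.toList * 2 ^ 5, negative_bound, PySem.Str.len layout + 2)

-- ===== PRECONDITION & SPEC =====
def Spec_layout_to_int_of_bits (layout : String) (out : Int × Int × Int) : Prop := out = layout_to_int_of_bits_alt layout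
instance (layout : String) (out : Int × Int × Int) : Decidable (Spec_layout_to_int_of_bits layout out) := by unfold Spec_layout_to_int_of_bits; infer_instance

-- ===== CLAIM (what is proved, stated in full; the proofs are below) =====
def Claim_equal_layout_to_int_of_bits : Prop := ∀ (layout : String), Dom_layout_to_int_of_bits layout → Spec_layout_to_int_of_bits layout (layout_to_int_of_bits layout)

-- ===== LEMMAS AND PROOFS =====

-- A's shift-accumulate over the reversed list, as a foldr over the list itself.
def pvShiftAcc (l : List Char) : Int :=
  l.foldr (fun x a => if x = '#' then a * 2 + 1 else a * 2) 0

theorem pvA_fold_eq (l : List Char) :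
    l.reverse.foldl (fun acc x =>
        let acc := acc * 2
        if x = '#' then acc + 1 else acc) 0 = pvShiftAcc l := by
  rw [List.foldl_reverse]; rfl

theorem pvShiftAcc_append (u v : List Char) :
    pvShiftAcc (u ++ v) = pvShiftAcc u + pvShiftAcc v * 2 ^ u.length := by
  induction u with
  | nil => simp [pvShiftAcc]
  | cons x xs ih =>
    show (if x = '#' then pvShiftAcc (xs ++ v) * 2 + 1 else pvShiftAcc (xs ++ v) * 2) = _
    rw [ih]
    show _ = (if x = '#' then pvShiftAcc xs * 2 + 1 else pvShiftAcc xs * 2)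
        + pvShiftAcc v * 2 ^ (xs.length + 1)
    split <;> · rw [pow_succ]; ring

theorem pvValue_eq (s : List Char) : pvValue s = pvShiftAcc s := by
  induction s using pvValue.induct with
  | case1 _ =>
    rw [pvValue]; simp [pvShiftAcc]
  | case2 s h hne =>
    rw [pvValue, if_pos h, if_neg hne]
    match s, h, hne with
    | [], _, _ => simp [pvShiftAcc]
    | [c], _, hne =>
      have hc : ¬ c = '#' := by simpa using hne
      simp [pvShiftAcc, hc]
  | case3 s h m ih1 ih2 =>
    rw [pvValue, if_neg h]
    have key := pvShiftAcc_append (s.take (s.length / 2)) (s.drop (s.length / 2))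
    rw [List.take_append_drop] at key
    have hmin : (List.take (s.length / 2) s).length = s.length / 2 := by
      rw [List.length_take]; omega
    rw [key, hmin]
    have h1 : pvValue (List.take (s.length / 2) s) = pvShiftAcc (List.take (s.length / 2) s) := ih1
    have h2 : pvValue (List.drop (s.length / 2) s) = pvShiftAcc (List.drop (s.length / 2) s) := ih2
    show pvValue (List.take (s.length / 2) s) + pvValue (List.drop (s.length / 2) s) * 2 ^ (s.length / 2) = _
    rw [h1, h2]

-- ===== VERDICT (by name: the statement is the Claim_ definition above) =====
theorem layout_to_int_of_bits_spec : Claim_equal_layout_to_int_of_bits := by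
  intro layout _
  show _ = _
  simp only [layout_to_int_of_bits, layout_to_int_of_bits_alt, pvA_fold_eq, pvValue_eq]
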